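-- pv_equiv track=rewrite | github.com/luc8080/AI-Assisted-Learning | spec_extractor.py | fallback_fill_fields
-- ===== SOURCE A (Python) =====
-- FALLBACK_FIELD_MAP = {
--     "part_number": ["part_number"],
--     "impedance": ["impedance"],
--     "dcr": ["dcr", "dc resistance"],
--     "current": ["current", "rated current"],
--     "test_frequency": ["test_frequency"],
--     "temp_min": ["temp_min", "low temp", "min temp"],
--     "temp_max": ["temp_max", "high temp", "max temp"],
--     "size": ["size"]
-- }
--
-- def fallback_fill_fields(result_dict: dict, original_row: dict) -> dict:
--     result = result_dict.copy()
--     for field, possible_keys in FALLBACK_FIELD_MAP.items():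
--         if field in result:
--             continue
--         for k in original_row:
--             if not k or not isinstance(k, str):
--                 continue
--             key_lower = k.strip().lower()
--             if any(alias in key_lower for alias in possible_keys):
--                 val = original_row.get(k)
--                 if val and isinstance(val, str) and val.strip():
--                     result[field] = val.strip()
--                     break
--     return result
-- ===== SOURCE B (Python) =====
-- FALLBACK_FIELD_MAP = {
--     "part_number": ["part_number"],
--     "impedance": ["impedance"],
--     "dcr": ["dcr", "dc resistance"],
--     "current": ["current", "rated current"],
--     "test_frequency": ["test_frequency"],
--     "temp_min": ["temp_min", "low temp", "min temp"],
--     "temp_max": ["temp_max", "high temp", "max temp"],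
--     "size": ["size"]
-- }
--
-- def fallback_fill_fields(result_dict: dict, original_row: dict) -> dict:
--     # Single key-outer pass: distribute each row key's value to the still-missing
--     # fields it matches (first key in row order wins), then merge in field order.
--     found = {}
--     for k, val in original_row.items():
--         if not k or not isinstance(k, str):
--             continue
--         if not (val and isinstance(val, str) and val.strip()):
--             continue
--         key_lower = k.strip().lower()
--         for field, aliases in FALLBACK_FIELD_MAP.items():
--             if field not in found and field not in result_dict and any(a in key_lower for a in aliases):
--                 found[field] = val.strip()
--     result = result_dict.copy()
--     for field in FALLBACK_FIELD_MAP: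
--         if field not in result and field in found:
--             result[field] = found[field]
--     return result
-- ===== Notes on version B (the rewrite author's own statement) =====
-- stated objective: alternative
-- what changed: A rescans the whole row once per missing field (field-outer loop with break); B makes a single key-outer pass that lower-cases each row key once and distributes its value to every still-missing matching field into a 'found' dict, then merges the found values in field order.
import Mathlib
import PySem

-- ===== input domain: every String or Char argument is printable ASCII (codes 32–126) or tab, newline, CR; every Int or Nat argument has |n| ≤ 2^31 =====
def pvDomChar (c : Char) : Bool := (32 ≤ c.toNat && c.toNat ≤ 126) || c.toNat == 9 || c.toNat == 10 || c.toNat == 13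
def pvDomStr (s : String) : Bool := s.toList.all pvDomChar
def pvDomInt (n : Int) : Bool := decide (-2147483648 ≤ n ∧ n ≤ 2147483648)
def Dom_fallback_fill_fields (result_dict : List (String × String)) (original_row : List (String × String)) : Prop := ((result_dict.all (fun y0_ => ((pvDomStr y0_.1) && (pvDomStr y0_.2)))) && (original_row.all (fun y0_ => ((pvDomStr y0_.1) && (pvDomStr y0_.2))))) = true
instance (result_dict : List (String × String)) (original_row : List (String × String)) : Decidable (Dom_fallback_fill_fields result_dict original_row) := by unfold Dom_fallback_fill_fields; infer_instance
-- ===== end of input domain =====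

-- B replaces A's field-outer/key-inner rescanning by one key-outer pass that distributes
-- each row key's value to the still-missing fields it matches, then merges in field order
-- (objective: alternative decomposition, same cost).

def pvFieldMap : List (String × List String) := [
  ("part_number", ["part_number"]),
  ("impedance", ["impedance"]),
  ("dcr", ["dcr", "dc resistance"]),
  ("current", ["current", "rated current"]),
  ("test_frequency", ["test_frequency"]),
  ("temp_min", ["temp_min", "low temp", "min temp"]),
  ("temp_max", ["temp_max", "high temp", "max temp"]),
  ("size", ["size"])]

-- ===== PORT A =====
-- inner 'for k in original_row: … break' loop of A
def pvFillField (rowD : PySem.Dict String String) (keys : List String) (field : String)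
    (aliases : List String) (res : PySem.Dict String String) : PySem.Dict String String :=
  match keys with
  | [] => res
  | k :: rest =>
    if k = "" then pvFillField rowD rest field aliases res
    else
      let keyLower := PySem.Str.lower (PySem.Str.strip k)
      if aliases.any (fun a => PySem.Str.isIn a keyLower) then
        let val := (rowD.get? k).getD ""
        if val ≠ "" ∧ PySem.Str.strip val ≠ "" then
          res.insert field (PySem.Str.strip val)
        else pvFillField rowD rest field aliases res
      else pvFillField rowD rest field aliases res

def fallback_fill_fields (result_dict : List (String × String)) (original_row : List (String × String)) : List (String × String) :=
  let rowD := PySem.Dict.ofList original_row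
  (pvFieldMap.foldl (fun res fp =>
      if res.contains fp.1 then res
      else pvFillField rowD rowD.keys fp.1 fp.2 res)
    (PySem.Dict.ofList result_dict)).items

-- ===== PORT B =====
-- body of B's key-outer loop: distribute one row item to every still-missing matching field
def pvFoundStep (resD : PySem.Dict String String) (found : PySem.Dict String String)
    (p : String × String) : PySem.Dict String String :=
  if p.1 = "" then found
  else if ¬(p.2 ≠ "" ∧ PySem.Str.strip p.2 ≠ "") then found
  else
    let keyLower := PySem.Str.lower (PySem.Str.strip p.1)
    pvFieldMap.foldl (fun found fp =>
      if found.contains fp.1 = false ∧ resD.contains fp.1 = false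
          ∧ fp.2.any (fun a => PySem.Str.isIn a keyLower) then
        found.insert fp.1 (PySem.Str.strip p.2)
      else found) found

def fallback_fill_fields_alt (result_dict : List (String × String)) (original_row : List (String × String)) : List (String × String) :=
  let resD := PySem.Dict.ofList result_dict
  let rowD := PySem.Dict.ofList original_row
  let found := rowD.items.foldl (pvFoundStep resD) PySem.Dict.empty
  (pvFieldMap.foldl (fun res fp =>
      if res.contains fp.1 = false ∧ found.contains fp.1 then
        res.insert fp.1 (found.getD fp.1 "")
      else res) resD).items

-- ===== PRECONDITION & SPEC =====
def Spec_fallback_fill_fields (result_dict : List (String × String)) (original_row : List (String × String)) (out : List (String × String)) : Prop := out = fallback_fill_fields_alt result_dict original_row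
instance (result_dict : List (String × String)) (original_row : List (String × String)) (out : List (String × String)) : Decidable (Spec_fallback_fill_fields result_dict original_row out) := by unfold Spec_fallback_fill_fields; infer_instance

-- ===== CLAIM (what is proved, stated in full; the proofs are below) =====
def Claim_equal_fallback_fill_fields : Prop := ∀ (result_dict : List (String × String)) (original_row : List (String × String)), Dom_fallback_fill_fields result_dict original_row → Spec_fallback_fill_fields result_dict original_row (fallback_fill_fields result_dict original_row)

-- ===== LEMMAS AND PROOFS =====

-- common functional spec: first row item (in order) feeding a given alias list
def pvFirstVal (items : List (String × String)) (aliases : List String) : Option String :=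
  match items with
  | [] => none
  | (k, v) :: rest =>
    if k ≠ "" ∧ v ≠ "" ∧ PySem.Str.strip v ≠ ""
        ∧ (aliases.any fun a => PySem.Str.isIn a (PySem.Str.lower (PySem.Str.strip k))) = true then
      some (PySem.Str.strip v)
    else pvFirstVal rest aliases

lemma pvFirstVal_cons (k v : String) (rest : List (String × String)) (as : List String) :
    pvFirstVal ((k, v) :: rest) as =
    if k ≠ "" ∧ v ≠ "" ∧ PySem.Str.strip v ≠ ""
        ∧ (as.any fun a => PySem.Str.isIn a (PySem.Str.lower (PySem.Str.strip k))) = true then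
      some (PySem.Str.strip v)
    else pvFirstVal rest as := rfl

lemma pvFillField_eq (rowD : PySem.Dict String String) (ps : List (String × String))
    (f : String) (as : List String) (res : PySem.Dict String String)
    (h : ∀ p ∈ ps, rowD.get? p.1 = some p.2) :
    pvFillField rowD (ps.map Prod.fst) f as res =
      match pvFirstVal ps as with
      | some v => res.insert f v
      | none => res := by
  induction ps generalizing res with
  | nil => rfl
  | cons p rest ih =>
    obtain ⟨k, v⟩ := p
    have hk : rowD.get? k = some v := h (k, v) (by simp)
    have hrest : ∀ p ∈ rest, rowD.get? p.1 = some p.2 := fun p hp => h p (by simp [hp])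
    rw [pvFirstVal_cons]
    simp only [List.map_cons, pvFillField, hk, Option.getD_some]
    by_cases hk0 : k = ""
    · rw [if_pos hk0, ih _ hrest, if_neg (fun hcon => hcon.1 hk0)]
    · rw [if_neg hk0]
      by_cases hm : (as.any fun a => PySem.Str.isIn a (PySem.Str.lower (PySem.Str.strip k))) = true
      · rw [if_pos hm]
        by_cases hv : v ≠ "" ∧ PySem.Str.strip v ≠ ""
        · rw [if_pos hv, if_pos ⟨hk0, hv.1, hv.2, hm⟩]
        · rw [if_neg hv, ih _ hrest, if_neg (fun hcon => hv ⟨hcon.2.1, hcon.2.2.1⟩)]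
      · rw [if_neg hm, ih _ hrest, if_neg (fun hcon => hm hcon.2.2.2)]

-- get? through one conditional insert
lemma pvGetIte (d : PySem.Dict String String) (c : Prop) [Decidable c] (f' f v : String)
    (h : f ≠ f') : (if c then d.insert f' v else d).get? f = d.get? f := by
  split_ifs with hc
  · exact PySem.Dict.get?_insert_of_ne d v h
  · rfl

lemma pvGetIteSelf (d : PySem.Dict String String) (c : Prop) [Decidable c] (f v : String) :
    (if c then d.insert f v else d).get? f = if c then some v else d.get? f := by
  split_ifs with hc
  · exact PySem.Dict.get?_insert_self d f v
  · rfl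

-- inner field-distribution loop leaves untouched fields alone
lemma pvInnerSkip (resD : PySem.Dict String String) (kl sv : String)
    (ms : List (String × List String)) (f : String) (hf : f ∉ ms.map Prod.fst)
    (d : PySem.Dict String String) :
    (ms.foldl (fun found fp =>
      if found.contains fp.1 = false ∧ resD.contains fp.1 = false
          ∧ (fp.2.any fun a => PySem.Str.isIn a kl) = true then
        found.insert fp.1 sv
      else found) d).get? f = d.get? f := by
  induction ms generalizing d with
  | nil => rfl
  | cons p rest ih =>
    simp only [List.map_cons, List.mem_cons, not_or] at hf
    simp only [List.foldl_cons, ih hf.2]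
    exact pvGetIte _ _ _ _ _ hf.1

-- inner field-distribution loop at a field of the map
lemma pvInnerGet (resD : PySem.Dict String String) (kl sv : String)
    (ms : List (String × List String)) (f : String) (as : List String)
    (hnd : (ms.map Prod.fst).Nodup) (hmem : (f, as) ∈ ms)
    (d : PySem.Dict String String) :
    (ms.foldl (fun found fp =>
      if found.contains fp.1 = false ∧ resD.contains fp.1 = false
          ∧ (fp.2.any fun a => PySem.Str.isIn a kl) = true then
        found.insert fp.1 sv
      else found) d).get? f =
    match d.get? f with
    | some w => some w
    | none =>
        if resD.contains f = false ∧ (as.any fun a => PySem.Str.isIn a kl) = true then some sv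
        else none := by
  induction ms generalizing d with
  | nil => simp at hmem
  | cons p rest ih =>
    simp only [List.map_cons, List.nodup_cons] at hnd
    rcases List.mem_cons.mp hmem with heq | hrest
    · subst heq
      simp only [List.foldl_cons]
      rw [pvInnerSkip resD kl sv rest f hnd.1, pvGetIteSelf,
        PySem.Dict.contains_eq_isSome_get?]
      cases hdf : d.get? f with
      | some w => simp
      | none =>
        by_cases hc : resD.contains f = false ∧ (as.any fun a => PySem.Str.isIn a kl) = true
        · rw [if_pos ⟨rfl, hc.1, hc.2⟩]; exact (if_pos hc).symm
        · rw [if_neg (fun h => hc ⟨h.2.1, h.2.2⟩)]; exact (if_neg hc).symm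
    · have hne : f ≠ p.1 := by
        intro h; exact hnd.1 (h ▸ (List.mem_map.mpr ⟨(f, as), hrest, rfl⟩))
      simp only [List.foldl_cons]
      rw [ih hnd.2 hrest]
      congr 1
      exact pvGetIte _ _ _ _ _ hne

-- the found dict computes pvFirstVal for every still-missing field of the map
lemma pvFoundGet (resD : PySem.Dict String String) (items : List (String × String))
    (f : String) (as : List String) (hmem : (f, as) ∈ pvFieldMap)
    (found0 : PySem.Dict String String) :
    (items.foldl (pvFoundStep resD) found0).get? f =
    match found0.get? f with
    | some w => some w
    | none => if resD.contains f = true then none else pvFirstVal items as := by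
  have hnd : (pvFieldMap.map Prod.fst).Nodup := by decide
  induction items generalizing found0 with
  | nil => cases h : found0.get? f <;> simp [h, pvFirstVal]
  | cons p rest ih =>
    obtain ⟨k, v⟩ := p
    simp only [List.foldl_cons]
    by_cases hk0 : k = ""
    · have hcons : pvFirstVal ((k, v) :: rest) as = pvFirstVal rest as := by
        rw [pvFirstVal_cons, if_neg (fun hcon => hcon.1 hk0)]
      have hstep : pvFoundStep resD found0 (k, v) = found0 := by
        simp [pvFoundStep, hk0]
      rw [ih, hstep, hcons]
    · by_cases hv : v ≠ "" ∧ PySem.Str.strip v ≠ ""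
      · have hstep : pvFoundStep resD found0 (k, v) =
            pvFieldMap.foldl (fun found fp =>
              if found.contains fp.1 = false ∧ resD.contains fp.1 = false
                  ∧ (fp.2.any fun a => PySem.Str.isIn a (PySem.Str.lower (PySem.Str.strip k))) = true then
                found.insert fp.1 (PySem.Str.strip v)
              else found) found0 := by
          simp [pvFoundStep, hk0, hv]
        rw [ih, hstep, pvInnerGet resD _ _ pvFieldMap f as hnd hmem]
        by_cases hm : (as.any fun a => PySem.Str.isIn a (PySem.Str.lower (PySem.Str.strip k))) = true
        · have hcons : pvFirstVal ((k, v) :: rest) as = some (PySem.Str.strip v) := by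
            rw [pvFirstVal_cons, if_pos ⟨hk0, hv.1, hv.2, hm⟩]
          rw [hcons]
          cases h0 : found0.get? f with
          | some w => rfl
          | none =>
            by_cases hr : resD.contains f = true
            · rw [if_neg (fun hcon => absurd (hr.symm.trans hcon.1) (by decide)),
                if_pos hr, if_pos hr]
            · have hr' : resD.contains f = false := by simpa using hr
              rw [if_pos ⟨hr', hm⟩, if_neg hr, if_neg hr]
        · have hcons : pvFirstVal ((k, v) :: rest) as = pvFirstVal rest as := by
            rw [pvFirstVal_cons, if_neg (fun hcon => hm hcon.2.2.2)]
          rw [hcons]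
          cases h0 : found0.get? f with
          | some w => rfl
          | none => rw [if_neg (fun hcon => hm hcon.2)]
      · have hcons : pvFirstVal ((k, v) :: rest) as = pvFirstVal rest as := by
          rw [pvFirstVal_cons, if_neg (fun hcon => hv ⟨hcon.2.1, hcon.2.2.1⟩)]
        have hstep : pvFoundStep resD found0 (k, v) = found0 := by
          simp only [pvFoundStep]
          rw [if_neg hk0, if_pos hv]
        rw [ih, hstep, hcons]

-- the two merge passes agree
lemma pvMerge (resD found : PySem.Dict String String) (items : List (String × String))
    (ms : List (String × List String))
    (hfound : ∀ p ∈ ms, found.get? p.1 =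
        (if resD.contains p.1 = true then none else pvFirstVal items p.2))
    (res : PySem.Dict String String)
    (hmono : ∀ x, resD.contains x = true → res.contains x = true) :
    ms.foldl (fun res fp =>
      if res.contains fp.1 then res
      else match pvFirstVal items fp.2 with
        | some v => res.insert fp.1 v
        | none => res) res =
    ms.foldl (fun res fp =>
      if res.contains fp.1 = false ∧ found.contains fp.1 then
        res.insert fp.1 (found.getD fp.1 "")
      else res) res := by
  induction ms generalizing res with
  | nil => rfl
  | cons p rest ih =>
    obtain ⟨f, as⟩ := p
    have hf := hfound (f, as) (by simp)
    have hrest : ∀ p ∈ rest, found.get? p.1 =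
        (if resD.contains p.1 = true then none else pvFirstVal items p.2) :=
      fun p hp => hfound p (by simp [hp])
    simp only [List.foldl_cons]
    by_cases hc : res.contains f = true
    · rw [if_pos hc, if_neg (fun hcon => absurd (hc.symm.trans hcon.1) (by decide))]
      exact ih hrest res hmono
    · have hc' : res.contains f = false := by simpa using hc
      have hrD : resD.contains f = false := by
        by_contra hcon
        have := hmono f (by simpa using hcon)
        rw [this] at hc'
        exact absurd hc' (by simp)
      have hf' : found.get? f = pvFirstVal items as := by
        rw [hf, hrD]; rfl
      cases hfv : pvFirstVal items as with
      | some v =>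
        have hcf : found.contains f = true := by
          rw [PySem.Dict.contains_eq_isSome_get?, hf', hfv]; rfl
        have hgd : found.getD f "" = v := by
          rw [PySem.Dict.getD_eq_get?_getD, hf', hfv]; rfl
        rw [if_neg hc, if_pos ⟨hc', hcf⟩, hgd]
        refine ih hrest _ (fun x hx => ?_)
        rw [PySem.Dict.contains_insert]
        simp [hmono x hx]
      | none =>
        have hcf : found.contains f = false := by
          rw [PySem.Dict.contains_eq_isSome_get?, hf', hfv]; rfl
        rw [if_neg hc, if_neg (fun hcon => absurd (hcf.symm.trans hcon.2) (by decide))]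
        exact ih hrest res hmono

-- ===== VERDICT (by name: the statement is the Claim_ definition above) =====
theorem fallback_fill_fields_spec : Claim_equal_fallback_fill_fields := by
  intro result_dict original_row _hdom
  show fallback_fill_fields result_dict original_row
      = fallback_fill_fields_alt result_dict original_row
  simp only [fallback_fill_fields, fallback_fill_fields_alt]
  refine congrArg PySem.Dict.items ?_
  have hnd : (PySem.Dict.ofList original_row).keys.Nodup :=
    PySem.Dict.nodup_keys_ofList original_row
  have hget : ∀ p ∈ (PySem.Dict.ofList original_row).items,
      (PySem.Dict.ofList original_row).get? p.1 = some p.2 := by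
    intro p hp
    obtain ⟨k, v⟩ := p
    exact PySem.Dict.get?_of_mem_items (PySem.Dict.ofList original_row) hp hnd
  have hkeys : (PySem.Dict.ofList original_row).keys
      = (PySem.Dict.ofList original_row).items.map Prod.fst := rfl
  have hfill : ∀ (f : String) (as : List String) (res : PySem.Dict String String),
      pvFillField (PySem.Dict.ofList original_row) (PySem.Dict.ofList original_row).keys f as res =
        match pvFirstVal (PySem.Dict.ofList original_row).items as with
        | some v => res.insert f v
        | none => res := by
    intro f as res
    rw [hkeys]
    exact pvFillField_eq _ _ f as res hget
  have hfound : ∀ p ∈ pvFieldMap,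
      ((PySem.Dict.ofList original_row).items.foldl
          (pvFoundStep (PySem.Dict.ofList result_dict)) PySem.Dict.empty).get? p.1 =
        (if (PySem.Dict.ofList result_dict).contains p.1 = true then none
         else pvFirstVal (PySem.Dict.ofList original_row).items p.2) := by
    intro p hp
    rw [pvFoundGet (PySem.Dict.ofList result_dict) _ p.1 p.2 hp
      PySem.Dict.empty]
    rfl
  calc (pvFieldMap.foldl (fun res fp =>
        if res.contains fp.1 then res
        else pvFillField (PySem.Dict.ofList original_row)
          (PySem.Dict.ofList original_row).keys fp.1 fp.2 res)
        (PySem.Dict.ofList result_dict))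
      = pvFieldMap.foldl (fun res fp =>
        if res.contains fp.1 then res
        else match pvFirstVal (PySem.Dict.ofList original_row).items fp.2 with
          | some v => res.insert fp.1 v
          | none => res) (PySem.Dict.ofList result_dict) := by
        simp only [hfill]
    _ = _ := pvMerge (PySem.Dict.ofList result_dict) _ _ pvFieldMap hfound
        (PySem.Dict.ofList result_dict) (fun x hx => hx)
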